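-- pv_equiv track=rewrite | github.com/Neeraj-Palliyali/chegg_python | passwordStrength.py | checkSmallChar
-- ===== SOURCE A (Python) =====
-- def checkSmallChar(userPassword, score):
--     # flag for only adding score once
--     flag=0
--     # check if there are character (a-z) Lowercase letters in password
--     for i in range(97, 123):
--         # 97-122 is the ascii equalent of a-z
--         if(chr(i) in userPassword):
--             if(flag==0):
--                 score += 1
--                 flag = 1
--     return score
-- ===== SOURCE B (Python) =====
-- def checkSmallChar(userPassword, score):
--     for c in userPassword:
--         if 'a' <= c <= 'z':
--             return score + 1
--     return score
-- ===== Notes on version B (the rewrite author's own statement) =====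
-- stated objective: simpler
-- what changed: B scans the password's own characters with an early return on the first 'a'..'z' character, instead of looping over all 26 alphabet codes with a substring test and a once-only flag.
import Mathlib
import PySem

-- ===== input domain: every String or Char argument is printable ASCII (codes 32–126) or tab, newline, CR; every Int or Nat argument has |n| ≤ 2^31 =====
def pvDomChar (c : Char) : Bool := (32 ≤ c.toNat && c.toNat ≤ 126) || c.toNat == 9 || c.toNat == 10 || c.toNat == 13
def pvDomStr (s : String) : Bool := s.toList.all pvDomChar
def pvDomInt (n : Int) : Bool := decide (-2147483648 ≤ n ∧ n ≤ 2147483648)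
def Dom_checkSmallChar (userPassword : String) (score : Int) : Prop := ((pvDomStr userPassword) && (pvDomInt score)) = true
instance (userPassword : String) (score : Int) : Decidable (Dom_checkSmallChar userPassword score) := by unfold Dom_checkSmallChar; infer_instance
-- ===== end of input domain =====

-- B scans the password's own characters with an early return on the first 'a'..'z'
-- character, instead of A's loop over all 26 alphabet codes with a flag (objective: simpler).


-- ===== PORT A =====
-- 'chr(i) in userPassword' is a single-character substring test, exact as character membership.
def checkSmallCharStep (cs : List Char) (st : Int × Int) (i : Int) : Int × Int :=
  if cs.contains (Char.ofNat i.toNat) then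
    (if st.2 == 0 then (st.1 + 1, 1) else st)
  else st

def checkSmallChar (userPassword : String) (score : Int) : Int :=
  ((PySem.List.pyRange 97 123 1).foldl (checkSmallCharStep userPassword.toList) (score, 0)).1

-- ===== PORT B =====
-- early-return loop over the password's characters
def checkSmallCharAltGo (cs : List Char) (score : Int) : Int :=
  match cs with
  | [] => score
  | c :: rest => if 'a' ≤ c ∧ c ≤ 'z' then score + 1 else checkSmallCharAltGo rest score

def checkSmallChar_alt (userPassword : String) (score : Int) : Int :=
  checkSmallCharAltGo userPassword.toList score

-- ===== PRECONDITION & SPEC =====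
def Spec_checkSmallChar (userPassword : String) (score : Int) (out : Int) : Prop := out = checkSmallChar_alt userPassword score
instance (userPassword : String) (score : Int) (out : Int) : Decidable (Spec_checkSmallChar userPassword score out) := by unfold Spec_checkSmallChar; infer_instance

-- ===== CLAIM (what is proved, stated in full; the proofs are below) =====
def Claim_equal_checkSmallChar : Prop := ∀ (userPassword : String) (score : Int), Dom_checkSmallChar userPassword score → Spec_checkSmallChar userPassword score (checkSmallChar userPassword score)

-- ===== LEMMAS AND PROOFS =====

theorem foldl_step_flag1 (cs : List Char) (l : List Int) (s : Int) :
    List.foldl (checkSmallCharStep cs) (s, 1) l = (s, 1) := by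
  induction l with
  | nil => rfl
  | cons i rest ih =>
      have hstep : checkSmallCharStep cs (s, 1) i = (s, 1) := by
        simp [checkSmallCharStep]
      rw [List.foldl_cons, hstep, ih]

theorem foldl_step_flag0 (cs : List Char) (l : List Int) (s : Int) :
    List.foldl (checkSmallCharStep cs) (s, 0) l =
      (if l.any (fun i => cs.contains (Char.ofNat i.toNat)) then (s + 1, 1) else (s, 0)) := by
  induction l with
  | nil => rfl
  | cons i rest ih =>
      simp only [List.foldl_cons, List.any_cons]
      by_cases h : Char.ofNat i.toNat ∈ cs
      · rw [show checkSmallCharStep cs (s, 0) i = (s + 1, 1) from by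
          simp [checkSmallCharStep, h], foldl_step_flag1]
        simp [h]
      · rw [show checkSmallCharStep cs (s, 0) i = (s, 0) from by
          simp [checkSmallCharStep, h], ih]
        simp [h]

theorem altGo_eq_any (cs : List Char) (s : Int) :
    checkSmallCharAltGo cs s =
      (if cs.any (fun c => decide ('a' ≤ c ∧ c ≤ 'z')) then s + 1 else s) := by
  induction cs with
  | nil => rfl
  | cons c rest ih =>
      simp only [checkSmallCharAltGo, List.any_cons]
      by_cases h : 'a' ≤ c ∧ c ≤ 'z'
      · rw [if_pos h]; simp [h]
      · rw [if_neg h, ih]; simp [h]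

theorem any_range_eq_any_chars (cs : List Char) :
    (PySem.List.pyRange 97 123 1).any (fun i => cs.contains (Char.ofNat i.toNat)) =
      cs.any (fun c => decide ('a' ≤ c ∧ c ≤ 'z')) := by
  rw [Bool.eq_iff_iff]
  simp only [List.any_eq_true, PySem.List.mem_pyRange_one, decide_eq_true_eq,
    List.contains_iff_mem]
  constructor
  · rintro ⟨i, ⟨h1, h2⟩, hmem⟩
    have hlt : i.toNat < 55296 := by omega
    have hv : (Char.ofNat i.toNat).toNat = i.toNat := by
      simp [Char.ofNat, Nat.isValidChar, hlt, Char.ofNatAux]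
    refine ⟨Char.ofNat i.toNat, hmem, ?_, ?_⟩
    · simp only [Char.le_def, UInt32.le_iff_toNat_le]
      show 97 ≤ (Char.ofNat i.toNat).toNat
      omega
    · simp only [Char.le_def, UInt32.le_iff_toNat_le]
      show (Char.ofNat i.toNat).toNat ≤ 122
      omega
  · rintro ⟨c, hmem, h1, h2⟩
    simp only [Char.le_def, UInt32.le_iff_toNat_le] at h1 h2
    replace h1 : 97 ≤ c.toNat := h1
    replace h2 : c.toNat ≤ 122 := h2
    refine ⟨(c.toNat : Int), ⟨by omega, by omega⟩, ?_⟩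
    have : ((c.toNat : Int)).toNat = c.toNat := by omega
    rw [this, Char.ofNat_toNat]
    exact hmem

-- ===== VERDICT (by name: the statement is the Claim_ definition above) =====
theorem checkSmallChar_spec : Claim_equal_checkSmallChar := by
  intro up s _
  unfold Spec_checkSmallChar checkSmallChar checkSmallChar_alt
  rw [foldl_step_flag0, altGo_eq_any, any_range_eq_any_chars]
  split_ifs <;> rfl
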